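-- pv_equiv track=rewrite | github.com/jk-jung/problem-solving | codewars/5kyu/5_Removing Internal Vertices.py | remove_internal
-- ===== SOURCE A (Python) =====
-- def remove_internal(t):
--     v = set(sum([list(x) for x in t], []))
--     r = []
--     for x in v:
--         l = [list(y) for y in t if x in y]
--         tt = set(sum(l, []))
--
--         if len(l) + 1 == len(tt):
--             r.append(x)
--     return v - set(r)
-- ===== SOURCE B (Python) =====
-- def remove_internal(t):
--     inc = {}
--     for y in t:
--         for x in dict.fromkeys(y):
--             c, s = inc.get(x, (0, set()))
--             inc[x] = (c + 1, s.union(y))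
--     return {x for x, (c, s) in inc.items() if c + 1 != len(s)}
-- ===== Notes on version B (the rewrite author's own statement) =====
-- stated objective: faster
-- what changed: A rescans the whole edge list for every vertex to build its incident edges and their vertex set; B makes one grouping pass that keeps, per vertex, its incident-edge count and the union of its incident edges in a dict, then evaluates the len(l)+1 == len(tt) test locally per vertex.
import Mathlib
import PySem

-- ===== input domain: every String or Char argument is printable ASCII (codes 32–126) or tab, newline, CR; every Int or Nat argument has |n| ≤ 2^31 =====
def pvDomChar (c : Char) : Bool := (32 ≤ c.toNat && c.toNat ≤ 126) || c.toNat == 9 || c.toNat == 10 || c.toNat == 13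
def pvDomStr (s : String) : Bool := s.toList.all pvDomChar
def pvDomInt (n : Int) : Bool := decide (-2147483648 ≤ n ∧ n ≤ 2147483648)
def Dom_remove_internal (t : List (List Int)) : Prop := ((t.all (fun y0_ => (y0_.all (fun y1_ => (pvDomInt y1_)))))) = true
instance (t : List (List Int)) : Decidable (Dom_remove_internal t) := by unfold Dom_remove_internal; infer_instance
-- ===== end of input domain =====

-- B replaces A's per-vertex rescan of the whole edge list by one grouping pass (dict: vertex ↦ incident-edge count and neighbour set); objective: faster.

-- ===== PORT A =====
def remove_internal (t : List (List Int)) : List Int :=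
  -- v = set(sum([list(x) for x in t], []))
  let v : PySem.Set Int := PySem.Set.ofList ((t.map (fun x => x)).foldl (fun acc x => acc ++ x) [])
  -- for x in v: l = [list(y) for y in t if x in y]; tt = set(sum(l, [])); if len(l)+1 == len(tt): r.append(x)
  let r : List Int := v.foldl (fun r x =>
    let l : List (List Int) := (t.filter (fun y => y.contains x)).map (fun y => y)
    let tt : PySem.Set Int := PySem.Set.ofList (l.foldl (fun acc y => acc ++ y) [])
    if (l.length : Int) + 1 = PySem.Set.len tt then r ++ [x] else r) []
  -- return v - set(r)   (a Python set; compared as a finite set)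
  PySem.Set.diff v (PySem.Set.ofList r)

-- ===== PORT B =====
def remove_internal_alt (t : List (List Int)) : List Int :=
  -- inc = {}; for y in t: for x in dict.fromkeys(y): c, s = inc.get(x, (0, set())); inc[x] = (c + 1, s.union(y))
  let inc : PySem.Dict Int (Int × PySem.Set Int) := t.foldl (fun d y =>
    (PySem.List.dedup y).foldl (fun d x =>
      let p := d.getD x (0, (PySem.Set.empty : PySem.Set Int))
      d.insert x (p.1 + 1, PySem.Set.union p.2 y)) d) PySem.Dict.empty
  -- return {x for x, (c, s) in inc.items() if c + 1 != len(s)}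
  PySem.Set.ofList ((inc.items.filter (fun p => !(p.2.1 + 1 == PySem.Set.len p.2.2))).map (fun p => p.1))

-- ===== PRECONDITION & SPEC =====
def Spec_remove_internal (t : List (List Int)) (out : List Int) : Prop := out = remove_internal_alt t
instance (t : List (List Int)) (out : List Int) : Decidable (Spec_remove_internal t out) := by unfold Spec_remove_internal; infer_instance

-- ===== CLAIM (what is proved, stated in full; the proofs are below) =====
def Claim_equal_remove_internal : Prop := ∀ (t : List (List Int)), Dom_remove_internal t → Spec_remove_internal t (remove_internal t)

-- ===== LEMMAS AND PROOFS =====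

-- Effect of B's inner loop (over the deduplicated vertices of one edge) on one dict entry.
lemma pv_inner_getD (y : List Int) (ys : List Int) (hys : ys.Nodup)
    (d : PySem.Dict Int (Int × PySem.Set Int)) (x : Int) :
    (ys.foldl (fun d x =>
        d.insert x ((d.getD x (0, (PySem.Set.empty : PySem.Set Int))).1 + 1,
          PySem.Set.union (d.getD x (0, (PySem.Set.empty : PySem.Set Int))).2 y)) d).getD x (0, PySem.Set.empty)
      = if x ∈ ys then
          ((d.getD x (0, (PySem.Set.empty : PySem.Set Int))).1 + 1,
            PySem.Set.union (d.getD x (0, (PySem.Set.empty : PySem.Set Int))).2 y)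
        else d.getD x (0, PySem.Set.empty) := by
  induction ys generalizing d with
  | nil => simp
  | cons a rest ih =>
    rcases List.nodup_cons.mp hys with ⟨ha, hrest⟩
    simp only [List.foldl_cons]
    rw [ih hrest]
    by_cases hx : x = a
    · subst hx
      simp [ha]
    · simp [PySem.Dict.getD_insert, hx, List.mem_cons]

-- Effect of B's whole grouping pass on one dict entry: edge count and union of incident edges.
lemma pv_outer_getD (t : List (List Int)) (d : PySem.Dict Int (Int × PySem.Set Int)) (x : Int) :
    (t.foldl (fun d y =>
        (PySem.List.dedup y).foldl (fun d x =>
          d.insert x ((d.getD x (0, (PySem.Set.empty : PySem.Set Int))).1 + 1,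
            PySem.Set.union (d.getD x (0, (PySem.Set.empty : PySem.Set Int))).2 y)) d) d).getD x (0, PySem.Set.empty)
      = ((d.getD x (0, (PySem.Set.empty : PySem.Set Int))).1 + ((t.filter (fun y => y.contains x)).length : Int),
         (t.filter (fun y => y.contains x)).foldl (fun s y => PySem.Set.union s y)
           (d.getD x (0, (PySem.Set.empty : PySem.Set Int))).2) := by
  induction t generalizing d with
  | nil => simp
  | cons y rest ih =>
    simp only [List.foldl_cons, List.filter_cons]
    rw [ih, pv_inner_getD y _ (PySem.List.nodup_dedup y) d x]
    by_cases hx : x ∈ y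
    · simp only [PySem.List.mem_dedup, hx, if_pos, List.contains_iff_mem,
        List.length_cons, List.foldl_cons]
      refine Prod.ext ?_ rfl
      push_cast
      ring
    · simp [hx]

-- Updating a set with a deduplicated list is updating it with the list itself.
lemma pv_update_dedup (s : PySem.Set Int) (y : List Int) :
    PySem.Set.update s (PySem.List.dedup y) = PySem.Set.update s y := by
  rw [PySem.Set.update_eq_append_filter, PySem.Set.update_eq_append_filter]
  simp [PySem.List.dedup_eq_ofList, PySem.Set.ofList_ofList]

-- The keys produced by B's grouping pass: all vertices in first-occurrence order.
lemma pv_outer_keys (t : List (List Int)) (d : PySem.Dict Int (Int × PySem.Set Int)) :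
    (t.foldl (fun d y =>
        (PySem.List.dedup y).foldl (fun d x =>
          d.insert x ((d.getD x (0, (PySem.Set.empty : PySem.Set Int))).1 + 1,
            PySem.Set.union (d.getD x (0, (PySem.Set.empty : PySem.Set Int))).2 y)) d) d).keys
      = PySem.Set.update d.keys (t.flatMap (fun y => y)) := by
  induction t generalizing d with
  | nil => simp [PySem.Set.update_nil]
  | cons y rest ih =>
    simp only [List.foldl_cons, List.flatMap_cons]
    rw [ih, PySem.Dict.keys_foldl_insert, pv_update_dedup, PySem.Set.update_append]

-- A fold of set-unions is one update with the concatenation.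
lemma pv_foldl_union (l : List (List Int)) (s : PySem.Set Int) :
    l.foldl (fun s y => PySem.Set.union s y) s = PySem.Set.update s (l.flatMap (fun y => y)) := by
  induction l generalizing s with
  | nil => simp [PySem.Set.update_nil]
  | cons y rest ih =>
    simp only [List.foldl_cons, List.flatMap_cons]
    rw [ih, PySem.Set.update_append]
    rfl

-- Filtering a dict's items by a key-determined test, then projecting keys = filtering the keys.
lemma pv_items_filter_map (d : PySem.Dict Int (Int × PySem.Set Int)) (Q : Int → Bool)
    (P : Int × (Int × PySem.Set Int) → Bool) (hPQ : ∀ p ∈ d.items, P p = Q p.1) :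
    (d.items.filter P).map (fun p => p.1) = d.keys.filter Q := by
  rw [List.filter_congr hPQ]
  simp only [PySem.Dict.keys]
  rw [List.filter_map]
  rfl

-- B's grouping pass as one name (proof-only shorthand for the fold inside remove_internal_alt).
def pvGroup (t : List (List Int)) : PySem.Dict Int (Int × PySem.Set Int) :=
  t.foldl (fun d y =>
    (PySem.List.dedup y).foldl (fun d x =>
      d.insert x ((d.getD x (0, (PySem.Set.empty : PySem.Set Int))).1 + 1,
        PySem.Set.union (d.getD x (0, (PySem.Set.empty : PySem.Set Int))).2 y)) d) PySem.Dict.empty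

lemma pvGroup_getD (t : List (List Int)) (x : Int) :
    (pvGroup t).getD x (0, PySem.Set.empty)
      = (((t.filter (fun y => y.contains x)).length : Int),
         PySem.Set.ofList ((t.filter (fun y => y.contains x)).flatMap (fun y => y))) := by
  unfold pvGroup
  rw [pv_outer_getD, pv_foldl_union]
  simp [PySem.Dict.getD_empty, PySem.Set.update_nil_left]

lemma pvGroup_keys (t : List (List Int)) :
    (pvGroup t).keys = PySem.Set.ofList (t.flatMap (fun y => y)) := by
  unfold pvGroup
  rw [pv_outer_keys]
  simp [PySem.Dict.keys_empty, PySem.Set.update_nil_left]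

lemma pvAlt_eq (t : List (List Int)) :
    remove_internal_alt t
      = PySem.Set.ofList (((pvGroup t).items.filter
          (fun p => !(p.2.1 + 1 == PySem.Set.len p.2.2))).map (fun p => p.1)) := rfl

-- ===== VERDICT (by name: the statement is the Claim_ definition above) =====
theorem remove_internal_spec : Claim_equal_remove_internal := by
  intro t _
  unfold Spec_remove_internal
  rw [pvAlt_eq]
  simp only [remove_internal]
  rw [PySem.List.foldl_append_eq_flatMap, PySem.List.foldl_append_ite_eq_filter
    (p := fun x => (((t.filter (fun y => y.contains x)).map (fun y => y)).length : Int) + 1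
      = PySem.Set.len (PySem.Set.ofList (((t.filter (fun y => y.contains x)).map (fun y => y)).foldl (fun acc y => acc ++ y) [])))]
  simp only [List.map_id', List.nil_append]
  have hnk : (pvGroup t).keys.Nodup := by
    rw [pvGroup_keys]; exact PySem.Set.nodup_ofList _
  rw [pv_items_filter_map (pvGroup t)
      (fun k => !(((pvGroup t).getD k (0, PySem.Set.empty)).1 + 1 ==
        PySem.Set.len ((pvGroup t).getD k (0, PySem.Set.empty)).2))
      _
      (by
        intro p hp
        have hget := PySem.Dict.getD_of_mem_items (pvGroup t) (k := p.1) (v := p.2)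
          (by simpa using hp) hnk (0, PySem.Set.empty)
        simp only [hget])]
  have hself : PySem.Set.ofList (((pvGroup t).keys).filter (fun k =>
        !(((pvGroup t).getD k (0, PySem.Set.empty)).1 + 1 ==
          PySem.Set.len ((pvGroup t).getD k (0, PySem.Set.empty)).2)))
      = ((pvGroup t).keys).filter (fun k =>
        !(((pvGroup t).getD k (0, PySem.Set.empty)).1 + 1 ==
          PySem.Set.len ((pvGroup t).getD k (0, PySem.Set.empty)).2)) :=
    PySem.Set.ofList_eq_self_of_nodup _ (hnk.filter _)
  rw [hself, pvGroup_keys]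
  simp only [PySem.Set.diff]
  apply List.filter_congr
  intro x hx
  rw [pvGroup_getD]
  simp only [PySem.Set.mem_ofList, List.mem_flatMap] at hx
  simp [List.mem_filter, hx, PySem.Set.mem_ofList]
  rw [PySem.List.foldl_append_eq_flatMap]
  simp
  rw [Bool.eq_iff_iff]
  simp
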